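-- pv_equiv track=rewrite | github.com/TseIvan/AdventCode | day4.py | changedCriteria
-- ===== SOURCE A (Python) =====
-- def repeatingSeq(number):
--     # Every number is ensured a adjacent number
--     dupe = set([x for x in str(number) if str(number).count(x) >= 2])
--     if len(dupe) == 1:
--         if str(number).count(next(iter(dupe))) == 2:
--             return True
--         return False # Only one repeating and it repeats more than twice
--     else:
--         for i in dupe:
--             if str(number).count(i) == 2:
--                 return True
--         return False
--
-- def changedCriteria(x:int = 206938,y:int = 679128) -> int:
--     counter = 0
--     for number in range(x, y+1):
--         if len(set(str(number))) <= 5: # Since there could be possibliity of being adjacent in any of the 6 positions we know that it set would have len <= 5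
--             if number == int("".join(sorted(str(number)))): # Left to right it must never decrease. eg 577999 has set len = 3 sorted it would be 5,7,7,9,9,9 and is within bounds
--                 if repeatingSeq(int(number)):
--                     counter += 1
--     return counter
-- ===== SOURCE B (Python) =====
-- def changedCriteria(x: int = 206938, y: int = 679128) -> int:
--     total = 0
--     for n in range(x, y + 1):
--         t = sorted(str(n))
--         if n == int("".join(t)):
--             # t is non-decreasing, so equal characters are adjacent: one
--             # run-length pass gives every character's multiplicity and the
--             # number of distinct characters, with no sets or count() rescans.
--             run, runs, pair = 1, 1, False
--             for prev, cur in zip(t, t[1:]):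
--                 if cur == prev:
--                     run += 1
--                 else:
--                     if run == 2:
--                         pair = True
--                     runs += 1
--                     run = 1
--             if run == 2:
--                 pair = True
--             if runs <= 5 and pair:
--                 total += 1
--     return total
-- ===== Notes on version B (the rewrite author's own statement) =====
-- stated objective: simpler
-- what changed: B deletes the set(str(n)) distinct-count pass and the whole repeatingSeq helper (duplicate set plus repeated str.count scans with a special one-duplicate branch); it sorts the digits once and makes a single run-length pass over the sorted characters, reading off the distinct count (number of runs) and the exactly-twice test (a run of length 2) from adjacency.
import Mathlib
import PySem

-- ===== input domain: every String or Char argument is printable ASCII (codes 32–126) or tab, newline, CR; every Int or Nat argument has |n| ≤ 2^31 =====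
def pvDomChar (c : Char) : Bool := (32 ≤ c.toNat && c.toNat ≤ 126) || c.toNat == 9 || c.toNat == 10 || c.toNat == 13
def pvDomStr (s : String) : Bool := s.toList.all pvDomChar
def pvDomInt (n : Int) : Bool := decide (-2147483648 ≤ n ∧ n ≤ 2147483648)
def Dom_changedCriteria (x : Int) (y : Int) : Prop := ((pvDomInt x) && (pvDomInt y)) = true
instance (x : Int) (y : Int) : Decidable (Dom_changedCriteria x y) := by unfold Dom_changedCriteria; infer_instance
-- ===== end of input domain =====

-- B drops A's set(str(n)) pass and the whole repeatingSeq helper (duplicate set plus repeated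
-- str.count scans): it sorts the digits once and reads distinct count and the exactly-twice test
-- off one run-length pass over the sorted characters (objective: simpler).

-- ===== PORT A =====
-- helper repeatingSeq(number) of A; the 'next(iter(dupe))' is ported as .headI:
-- it is only evaluated under the guard len(dupe) == 1, where iteration order is irrelevant
def repeatingSeq (number : Int) : Bool :=
  let dupe : PySem.Set Char :=
    PySem.Set.ofList ((PySem.Int.toChars number).filter
      (fun x => decide (2 ≤ PySem.Chars.count (PySem.Int.toChars number) [x])))
  if PySem.Set.len dupe = 1 then
    if PySem.Chars.count (PySem.Int.toChars number) [dupe.headI] = 2 then true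
    else false
  else
    -- 'for i in dupe: if count == 2: return True' then 'return False' — an order-independent any
    dupe.any (fun i => decide (PySem.Chars.count (PySem.Int.toChars number) [i] = 2))

def changedCriteria (x : Int) (y : Int) : Int :=
  (PySem.List.pyRange x (y + 1) 1).foldl
    (fun counter number =>
      if PySem.Set.len (PySem.Set.ofList (PySem.Int.toChars number)) ≤ 5 then
        match PySem.Int.ofChars? (PySem.Chars.join []
            ((PySem.List.sorted (PySem.Int.toChars number) (fun c => c) false).map (fun c => [c]))) with
        | some m =>
          if number = m then (if repeatingSeq number then counter + 1 else counter) else counter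
        | none => counter   -- unreachable: ''.join(sorted(str(n))) always parses as an int
      else counter) 0

-- ===== PORT B =====
def changedCriteria_alt (x : Int) (y : Int) : Int :=
  (PySem.List.pyRange x (y + 1) 1).foldl
    (fun total n =>
      let t := PySem.List.sorted (PySem.Int.toChars n) (fun c => c) false
      match PySem.Int.ofChars? (PySem.Chars.join [] (t.map (fun c => [c]))) with
      | some m =>
        if n = m then
          let r := (t.zip (PySem.List.slice t (some 1) none)).foldl
            (fun st pc =>
              if pc.2 = pc.1 then (st.1 + 1, st.2.1, st.2.2)
              else ((1 : Int), st.2.1 + 1, if st.1 = 2 then true else st.2.2))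
            ((1 : Int), (1 : Int), false)
          let pair := if r.1 = 2 then true else r.2.2
          if r.2.1 ≤ 5 ∧ pair = true then total + 1 else total
        else total
      | none => total) 0   -- unreachable: ''.join(sorted(str(n))) always parses as an int

-- ===== PRECONDITION & SPEC =====
def Spec_changedCriteria (x : Int) (y : Int) (out : Int) : Prop := out = changedCriteria_alt x y
instance (x : Int) (y : Int) (out : Int) : Decidable (Spec_changedCriteria x y out) := by unfold Spec_changedCriteria; infer_instance

-- ===== CLAIM (what is proved, stated in full; the proofs are below) =====
def Claim_equal_changedCriteria : Prop := ∀ (x : Int) (y : Int), Dom_changedCriteria x y → Spec_changedCriteria x y (changedCriteria x y)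

-- ===== LEMMAS AND PROOFS =====

-- str.count with a single-character needle is the element count
lemma count_go_singleton (c : Char) : ∀ (l : List Char) (fuel acc : Nat), l.length ≤ fuel →
    PySem.Chars.count.go [c] fuel l acc = acc + l.count c := by
  intro l
  induction l with
  | nil => intro fuel acc _; cases fuel <;> rfl
  | cons h t ih =>
    intro fuel acc hf
    cases fuel with
    | zero => simp at hf
    | succ fuel =>
      have step : PySem.Chars.count.go [c] (fuel+1) (h::t) acc =
          (if [c].isPrefixOf (h::t) then PySem.Chars.count.go [c] fuel (List.drop ([c].length) (h::t)) (acc+1)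
           else PySem.Chars.count.go [c] fuel t acc) := rfl
      rw [step]
      have hpre : ([c].isPrefixOf (h::t)) = (c == h) := by simp [List.isPrefixOf]
      have hlen : t.length ≤ fuel := by simp at hf; omega
      by_cases hch : c = h
      · subst hch
        simp only [hpre, BEq.rfl, if_true, List.length_cons, List.length_nil,
          List.drop_succ_cons, List.drop_zero]
        rw [ih fuel (acc+1) hlen]
        simp
        omega
      · have hbe : (c == h) = false := by simp [hch]
        rw [hpre, hbe]
        simp only [Bool.false_eq_true, if_false]
        rw [ih fuel acc hlen]
        rw [List.count_cons_of_ne (Ne.symm hch)]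

lemma count_singleton (s : List Char) (c : Char) : PySem.Chars.count s [c] = s.count c := by
  unfold PySem.Chars.count
  simp only [List.isEmpty_cons, Bool.false_eq_true, if_false]
  simpa using count_go_singleton c s s.length 0 le_rfl

-- A's repeatingSeq is: some character of str(number) occurs exactly twice
lemma repeatingSeq_iff (n : Int) :
    repeatingSeq n = decide (∃ c ∈ PySem.Int.toChars n, (PySem.Int.toChars n).count c = 2) := by
  unfold repeatingSeq
  simp only [count_singleton]
  generalize PySem.Int.toChars n = s
  have hmem : ∀ x, x ∈ PySem.Set.ofList (s.filter (fun x => decide (2 ≤ s.count x))) ↔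
      x ∈ s ∧ 2 ≤ s.count x := by
    intro x
    rw [PySem.Set.mem_ofList]
    simp [List.mem_filter]
  by_cases h1 : PySem.Set.len (PySem.Set.ofList (s.filter (fun x => decide (2 ≤ s.count x)))) = 1
  · simp only [if_pos h1]
    have hl : (PySem.Set.ofList (s.filter (fun x => decide (2 ≤ s.count x)))).length = 1 := by
      have := h1
      unfold PySem.Set.len at this
      exact_mod_cast this
    obtain ⟨c, hc⟩ := List.length_eq_one_iff.mp hl
    have hcd : c ∈ s ∧ 2 ≤ s.count c := (hmem c).mp (by rw [hc]; exact List.mem_singleton_self c)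
    rw [hc]
    by_cases h2 : s.count c = 2
    · have hex : ∃ x ∈ s, s.count x = 2 := ⟨c, hcd.1, h2⟩
      simp [h2, hex]
    · have hnex : ¬ ∃ x ∈ s, s.count x = 2 := by
        rintro ⟨x, hx, hx2⟩
        have hxd : x ∈ PySem.Set.ofList (s.filter (fun x => decide (2 ≤ s.count x))) :=
          (hmem x).mpr ⟨hx, by omega⟩
        rw [hc, List.mem_singleton] at hxd
        exact h2 (hxd ▸ hx2)
      simp [h2, hnex]
  · simp only [if_neg h1]
    rw [Bool.eq_iff_iff]
    simp only [List.any_eq_true, decide_eq_true_eq]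
    constructor
    · rintro ⟨x, hx, hx2⟩
      exact ⟨x, ((hmem x).mp hx).1, hx2⟩
    · rintro ⟨x, hx, hx2⟩
      exact ⟨x, (hmem x).mpr ⟨hx, by omega⟩, hx2⟩

-- len(set(l)) is the Finset cardinality of l's elements
lemma setlen_eq_toFinset_card (l : List Char) :
    PySem.Set.len (PySem.Set.ofList l) = (l.toFinset.card : Int) := by
  unfold PySem.Set.len
  have hfs : (PySem.Set.ofList l).toFinset = l.toFinset := by
    apply Finset.ext
    intro a
    simp only [List.mem_toFinset]
    exact PySem.Set.mem_ofList l a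
  have := List.toFinset_card_of_nodup (PySem.Set.nodup_ofList l)
  rw [hfs] at this
  exact_mod_cast this.symm

lemma count_cons_ne (d c : Char) (r : List Char) (h : d ≠ c) :
    (c :: r).count d = r.count d := by
  simp [Ne.symm h]

lemma count_cons_self' (c : Char) (r : List Char) :
    (c :: r).count c = r.count c + 1 := by
  simp

-- in a non-decreasing list, the head does not reappear after a different element
lemma head_not_mem_of_ne {p c : Char} {r : List Char}
    (hP : (p :: c :: r).Pairwise (· ≤ ·)) (hne : c ≠ p) : p ∉ c :: r := by
  intro hmem
  rcases List.mem_cons.mp hmem with h | h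
  · exact hne h.symm
  · have hpc : p ≤ c := (List.pairwise_cons.mp hP).1 c (List.mem_cons_self)
    have hcp : c ≤ p := (List.pairwise_cons.mp (List.pairwise_cons.mp hP).2).1 p h
    exact hne (le_antisymm hcp hpc)

-- B's run counter: on a non-decreasing list it counts the distinct elements
lemma scan_runs : ∀ (u : List Char) (p : Char) (run runs : Int) (pair : Bool),
    (p :: u).Pairwise (· ≤ ·) →
    ((((p :: u).zip u).foldl
        (fun st pc =>
          if pc.2 = pc.1 then (st.1 + 1, st.2.1, st.2.2)
          else ((1 : Int), st.2.1 + 1, if st.1 = 2 then true else st.2.2))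
        (run, runs, pair)).2.1) = runs + (((u.toFinset).erase p).card : Int) := by
  intro u
  induction u with
  | nil => intro p run runs pair _; simp
  | cons c r ih =>
    intro p run runs pair hP
    have hzip : (p :: c :: r).zip (c :: r) = (p, c) :: ((c :: r).zip r) := rfl
    rw [hzip, List.foldl_cons]
    dsimp only
    by_cases hc : c = p
    · subst hc
      rw [if_pos rfl]
      rw [ih c (run + 1) runs pair (List.pairwise_cons.mp hP).2]
      simp [Finset.erase_insert_eq_erase]
    · rw [if_neg hc]
      rw [ih c 1 (runs + 1) (if run = 2 then true else pair) (List.pairwise_cons.mp hP).2]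
      have hpnotmem : p ∉ c :: r := head_not_mem_of_ne hP hc
      have hp1 : p ∉ r.toFinset := by
        intro h; exact hpnotmem (List.mem_cons_of_mem c (List.mem_toFinset.mp h))
      have hcard : ((insert c r.toFinset).erase p).card = ((r.toFinset).erase c).card + 1 := by
        rw [Finset.erase_eq_of_notMem (by
          intro h
          rcases Finset.mem_insert.mp h with h | h
          · exact hc h.symm
          · exact hp1 h)]
        by_cases hcr : c ∈ r.toFinset
        · rw [Finset.insert_eq_self.mpr hcr]
          exact (Finset.card_erase_add_one hcr).symm
        · rw [Finset.card_insert_of_notMem hcr, Finset.erase_eq_of_notMem hcr]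
      simp only [List.toFinset_cons, hcard]
      push_cast
      ring

-- B's pair flag: on a non-decreasing list it detects a multiplicity-2 element
lemma scan_pair : ∀ (u : List Char) (p : Char) (run runs : Int) (pair : Bool),
    (p :: u).Pairwise (· ≤ ·) →
    ((if (((p :: u).zip u).foldl
        (fun st pc =>
          if pc.2 = pc.1 then (st.1 + 1, st.2.1, st.2.2)
          else ((1 : Int), st.2.1 + 1, if st.1 = 2 then true else st.2.2))
        (run, runs, pair)).1 = 2 then true
      else (((p :: u).zip u).foldl
        (fun st pc =>
          if pc.2 = pc.1 then (st.1 + 1, st.2.1, st.2.2)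
          else ((1 : Int), st.2.1 + 1, if st.1 = 2 then true else st.2.2))
        (run, runs, pair)).2.2) = true
      ↔ (pair = true ∨ run + (u.count p : Int) = 2 ∨ ∃ c ∈ u, c ≠ p ∧ u.count c = 2)) := by
  intro u
  induction u with
  | nil =>
    intro p run runs pair _
    simp only [List.zip_nil_right, List.foldl_nil]
    constructor
    · intro h
      by_cases h2 : run = 2
      · exact Or.inr (Or.inl (by simpa using h2))
      · left; simpa [h2] using h
    · rintro (h | h | ⟨c, hc, _⟩)
      · simp [h]
      · have : run = 2 := by simpa using h
        simp [this]
      · exact absurd hc (List.not_mem_nil)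
  | cons c r ih =>
    intro p run runs pair hP
    have hzip : (p :: c :: r).zip (c :: r) = (p, c) :: ((c :: r).zip r) := rfl
    rw [hzip, List.foldl_cons]
    dsimp only
    by_cases hc : c = p
    · subst hc
      rw [if_pos rfl]
      rw [ih c (run + 1) runs pair (List.pairwise_cons.mp hP).2]
      constructor
      · rintro (h | h | ⟨d, hd, hdc, hd2⟩)
        · exact Or.inl h
        · refine Or.inr (Or.inl ?_)
          rw [count_cons_self']
          push_cast
          omega
        · exact Or.inr (Or.inr ⟨d, List.mem_cons_of_mem c hd,
            hdc, by rwa [count_cons_ne d c r hdc]⟩)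
      · rintro (h | h | ⟨d, hd, hdc, hd2⟩)
        · exact Or.inl h
        · refine Or.inr (Or.inl ?_)
          rw [count_cons_self'] at h
          push_cast at h
          omega
        · refine Or.inr (Or.inr ⟨d, ?_, hdc, ?_⟩)
          · rcases List.mem_cons.mp hd with h' | h'
            · exact absurd h' hdc
            · exact h'
          · rwa [count_cons_ne d c r hdc] at hd2
    · rw [if_neg hc]
      rw [ih c 1 (runs + 1) (if run = 2 then true else pair) (List.pairwise_cons.mp hP).2]
      have hpnotmem : p ∉ c :: r := head_not_mem_of_ne hP hc
      have hcountp : (c :: r).count p = 0 := List.count_eq_zero.mpr hpnotmem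
      constructor
      · rintro (h | h | ⟨d, hd, hdc, hd2⟩)
        · by_cases h2 : run = 2
          · refine Or.inr (Or.inl ?_)
            rw [hcountp]; omega
          · left; simpa [h2] using h
        · refine Or.inr (Or.inr ⟨c, List.mem_cons_self, Ne.intro hc, ?_⟩)
          rw [count_cons_self']
          omega
        · refine Or.inr (Or.inr ⟨d, List.mem_cons_of_mem c hd, ?_, ?_⟩)
          · intro hdp
            exact hpnotmem (hdp ▸ List.mem_cons_of_mem c hd)
          · rwa [count_cons_ne d c r hdc]
      · rintro (h | h | ⟨d, hd, hdp, hd2⟩)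
        · left; simp [h]
        · rw [hcountp] at h
          have : run = 2 := by omega
          left; simp [this]
        · by_cases hdc : d = c
          · subst hdc
            refine Or.inr (Or.inl ?_)
            rw [count_cons_self'] at hd2
            omega
          · refine Or.inr (Or.inr ⟨d, ?_, hdc, ?_⟩)
            · rcases List.mem_cons.mp hd with h' | h'
              · exact absurd h' hdc
              · exact h'
            · rwa [count_cons_ne d c r hdc] at hd2

-- ===== VERDICT (by name: the statement is the Claim_ definition above) =====
theorem changedCriteria_spec : Claim_equal_changedCriteria := by
  intro x y _
  unfold Spec_changedCriteria changedCriteria changedCriteria_alt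
  apply PySem.List.foldl_congr_mem
  intro acc n _
  dsimp only
  rw [PySem.Chars.join_nil_singletons]
  rcases ht : PySem.List.sorted (PySem.Int.toChars n) (fun c => c) false with _ | ⟨p, u⟩
  · -- sorted(str(n)) = [] forces str(n) = []; both sides keep the accumulator
    have hs : PySem.Int.toChars n = [] := by
      have := PySem.List.sorted_perm (xs := PySem.Int.toChars n) (key := fun c => c) (rev := false)
      rw [ht] at this
      exact (List.Perm.nil_eq this).symm
    have hnone : PySem.Int.ofChars? ([] : List Char) = none := by decide
    rw [hs, hnone]
    split <;> rfl
  · have hperm : (p :: u).Perm (PySem.Int.toChars n) := by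
      have := PySem.List.sorted_perm (xs := PySem.Int.toChars n) (key := fun c => c) (rev := false)
      rwa [ht] at this
    have hpw : (p :: u).Pairwise (· ≤ ·) := by
      have := PySem.List.sorted_pairwise (xs := PySem.Int.toChars n) (key := fun c => c)
      rwa [ht] at this
    rw [PySem.List.slice_from_one]
    simp only [List.tail_cons]
    cases hof : PySem.Int.ofChars? (p :: u) with
    | none => split <;> rfl
    | some m =>
      dsimp only
      by_cases hnm : n = m
      · simp only [if_pos hnm]
        -- distinct counts agree
        have hsetlen : PySem.Set.len (PySem.Set.ofList (PySem.Int.toChars n)) =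
            1 + (((u.toFinset).erase p).card : Int) := by
          rw [setlen_eq_toFinset_card, ← List.toFinset_eq_of_perm _ _ hperm]
          simp only [List.toFinset_cons]
          by_cases hpu : p ∈ u.toFinset
          · rw [Finset.insert_eq_self.mpr hpu]
            have := Finset.card_erase_add_one hpu
            push_cast [← this]
            ring
          · rw [Finset.card_insert_of_notMem hpu, Finset.erase_eq_of_notMem hpu]
            push_cast
            ring
        -- the exactly-twice tests agree
        have hrep : repeatingSeq n = true ↔
            (false = true ∨ (1 : Int) + (u.count p : Int) = 2 ∨ ∃ c ∈ u, c ≠ p ∧ u.count c = 2) := by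
          rw [repeatingSeq_iff]
          simp only [decide_eq_true_eq, Bool.false_eq_true, false_or]
          constructor
          · rintro ⟨c, hc, h2⟩
            have hc' : c ∈ p :: u := hperm.mem_iff.mpr hc
            have h2' : (p :: u).count c = 2 := by rw [hperm.count_eq]; exact h2
            by_cases hcp : c = p
            · subst hcp
              left
              rw [count_cons_self'] at h2'
              omega
            · right
              refine ⟨c, ?_, hcp, ?_⟩
              · rcases List.mem_cons.mp hc' with h | h
                · exact absurd h hcp
                · exact h
              · rwa [count_cons_ne c p u hcp] at h2'
          · rintro (h | ⟨c, hc, hcp, h2⟩)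
            · refine ⟨p, hperm.mem_iff.mp List.mem_cons_self, ?_⟩
              rw [← hperm.count_eq, count_cons_self']
              omega
            · refine ⟨c, hperm.mem_iff.mp (List.mem_cons_of_mem p hc), ?_⟩
              rw [← hperm.count_eq, count_cons_ne c p u hcp]
              exact h2
        have hruns := scan_runs u p 1 1 false hpw
        have hpair := scan_pair u p 1 1 false hpw
        by_cases hL : PySem.Set.len (PySem.Set.ofList (PySem.Int.toChars n)) ≤ 5
        · rw [if_pos hL]
          by_cases hrepb : repeatingSeq n = true
          · have hpairb := hpair.mpr (hrep.mp hrepb)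
            rw [hrepb]
            rw [if_pos (And.intro (by rw [hruns]; rw [hsetlen] at hL; omega) hpairb)]
            simp
          · have hrepb' : repeatingSeq n = false := by
              cases hb : repeatingSeq n
              · rfl
              · exact absurd hb hrepb
            rw [hrepb']
            simp only [Bool.false_eq_true, if_false]
            rw [if_neg (by
              intro hcontra
              exact hrepb (hrep.mpr (hpair.mp hcontra.2)))]
        · rw [if_neg hL]
          rw [if_neg (by
            intro hcontra
            rw [hruns] at hcontra
            rw [hsetlen] at hL
            omega
            : ¬ _)]
      · simp only [if_neg hnm]
        split <;> rfl
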